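-- pv_equiv track=rewrite | github.com/BrettRey/erdos-problem-993 | attack1_mode_superadditivity_plc_2026_02_19.py | mode_right
-- ===== SOURCE A (Python) =====
-- def mode_right(poly: list[int]) -> int:
--     """Rightmost index attaining the maximum coefficient."""
--     best_i = 0
--     best_v = poly[0]
--     for i, v in enumerate(poly):
--         if v >= best_v:
--             best_v = v
--             best_i = i
--     return best_i
-- ===== SOURCE B (Python) =====
-- def mode_right(poly: list[int]) -> int:
--     """Rightmost index attaining the maximum coefficient."""
--     m = max(poly)
--     return len(poly) - 1 - list(reversed(poly)).index(m)
-- ===== Notes on version B (the rewrite author's own statement) =====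
-- stated objective: simpler
-- what changed: Replaces the fused running-best scan over enumerate with two plain passes: max(poly) to get the value, then a reverse-list index to locate its rightmost occurrence.
-- outside the precondition, e.g. on mode_right([]): A raises IndexError, B raises ValueError
import Mathlib
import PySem

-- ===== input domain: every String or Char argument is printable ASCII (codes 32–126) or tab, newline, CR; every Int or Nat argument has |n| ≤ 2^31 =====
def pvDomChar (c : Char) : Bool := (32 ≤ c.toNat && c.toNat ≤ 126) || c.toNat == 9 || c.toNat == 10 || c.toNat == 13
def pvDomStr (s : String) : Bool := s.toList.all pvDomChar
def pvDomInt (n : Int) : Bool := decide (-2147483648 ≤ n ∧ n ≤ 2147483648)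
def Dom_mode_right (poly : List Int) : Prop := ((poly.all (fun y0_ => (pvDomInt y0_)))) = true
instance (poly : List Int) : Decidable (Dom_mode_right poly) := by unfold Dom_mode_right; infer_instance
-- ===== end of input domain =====

-- B is a simpler decomposition: max first, then locate its rightmost occurrence via a reverse index.
-- Pre_ excludes the empty list, on which both Pythons raise (A: IndexError, B: ValueError).

-- ===== PORT A =====
-- loop body of A: if v >= best_v: best_v, best_i = v, i
def stepA (b : Int × Int) (iv : Int × Int) : Int × Int :=
  if iv.2 ≥ b.2 then (iv.1, iv.2) else b

def mode_right (poly : List Int) : Int :=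
  match poly with
  | [] => 0  -- Python raises IndexError at poly[0]; excluded by Pre_
  | v0 :: _ =>
    ((PySem.List.enumerate poly 0).foldl stepA (0, v0)).1

-- ===== PORT B =====
def mode_right_alt (poly : List Int) : Int :=
  match PySem.List.max? poly (fun y => y) with
  | none => 0  -- Python raises ValueError at max([]); excluded by Pre_
  | some m =>
    match PySem.List.index? poly.reverse m with
    | none => 0  -- unreachable: m is an element of poly
    | some j => (poly.length : Int) - 1 - (j : Int)

-- ===== PRECONDITION & SPEC =====
def Pre_mode_right (poly : List Int) : Prop := poly ≠ []
instance (poly : List Int) : Decidable (Pre_mode_right poly) := by unfold Pre_mode_right; infer_instance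
def pvWitness_mode_right : List Int := ([3, 1, 3, 2])

def Spec_mode_right (poly : List Int) (out : Int) : Prop := out = mode_right_alt poly
instance (poly : List Int) (out : Int) : Decidable (Spec_mode_right poly out) := by unfold Spec_mode_right; infer_instance

-- ===== CLAIM (what is proved, stated in full; the proofs are below) =====
def Claim_equal_mode_right : Prop := ∀ (poly : List Int), Dom_mode_right poly → Pre_mode_right poly → Spec_mode_right poly (mode_right poly)

-- ===== LEMMAS AND PROOFS =====

-- running maximum of a nonempty list (junk 0 on [])
def mval : List Int → Int
  | [] => 0
  | h :: t => t.foldl max h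

theorem mval_append_singleton (h : Int) (t : List Int) (x : Int) :
    mval ((h :: t) ++ [x]) = max (mval (h :: t)) x := by
  simp [mval, List.foldl_append]

theorem foldl_max_mem : ∀ (t : List Int) (h : Int), t.foldl max h ∈ h :: t := by
  intro t
  induction t with
  | nil => simp
  | cons y ys ih =>
    intro h
    simp only [List.foldl_cons]
    rcases List.mem_cons.mp (ih (max h y)) with h1 | h1
    · rw [h1]
      rcases max_choice h y with h2 | h2 <;> rw [h2] <;> simp
    · simp [h1]

theorem mval_mem (xs : List Int) (hx : xs ≠ []) : mval xs ∈ xs := by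
  match xs with
  | h :: t => exact foldl_max_mem t h

theorem foldA_eq (xs : List Int) (h : Int) (hh : xs.head? = some h) :
    ∀ (b0 : Int × Int), b0.2 ≤ h →
      (PySem.List.enumerate xs 0).foldl stepA b0 =
        ((xs.length : Int) - 1 - (xs.reverse.idxOf (mval xs) : Int), mval xs) := by
  induction xs using List.reverseRecOn with
  | nil => simp at hh
  | append_singleton ys x ih =>
    intro b0 hb
    rw [PySem.List.enumerate_append, List.foldl_append]
    match ys, hh with
    | [], hh =>
      simp only [List.nil_append, List.head?_cons, Option.some.injEq] at hh
      subst hh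
      simp [PySem.List.enumerate, stepA, mval, hb]
    | y :: t, hh =>
      have hh' : (y :: t).head? = some h := by
        simpa using hh
      simp only [List.head?, Option.some.injEq] at hh'
      subst hh'
      rw [ih rfl b0 hb]
      rw [mval_append_singleton]
      by_cases hx : mval (y :: t) ≤ x
      · have hmax : max (mval (y :: t)) x = x := max_eq_right hx
        simp only [PySem.List.enumerate, stepA, List.foldl_cons, List.foldl_nil, hmax]
        rw [if_pos hx]
        simp
      · have hmax : max (mval (y :: t)) x = mval (y :: t) := max_eq_left (le_of_not_ge hx)
        have hne : x ≠ mval (y :: t) := by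
          intro h'; exact hx (le_of_eq h'.symm)
        simp only [PySem.List.enumerate, stepA, List.foldl_cons, List.foldl_nil, hmax]
        rw [if_neg hx]
        rw [List.reverse_append, List.reverse_singleton, List.singleton_append,
          List.idxOf_cons_ne _ hne]
        rw [Prod.ext_iff]
        refine ⟨?_, rfl⟩
        simp only [List.cons_append, List.length_cons, List.length_append, List.length_nil]
        push_cast
        omega

theorem mode_right_eq (poly : List Int) (hp : poly ≠ []) :
    mode_right poly = (poly.length : Int) - 1 - (poly.reverse.idxOf (mval poly) : Int) := by
  match poly with
  | v0 :: t =>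
    have := foldA_eq (v0 :: t) v0 rfl (0, v0) le_rfl
    simp only [mode_right, this]

theorem index?_of_mem (l : List Int) (v : Int) (h : v ∈ l) :
    PySem.List.index? l v = some (l.idxOf v) := by
  induction l with
  | nil => simp at h
  | cons x t ih =>
    by_cases hx : x = v
    · subst hx
      rw [PySem.List.index?_cons_self, List.idxOf_cons_self]
    · have hv : v ∈ t := by
        rcases List.mem_cons.mp h with h' | h'
        · exact absurd h'.symm hx
        · exact h'
      rw [PySem.List.index?_cons_of_ne _ hx, ih hv, List.idxOf_cons_ne _ hx]
      rfl

theorem mode_right_alt_eq (poly : List Int) (hp : poly ≠ []) :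
    mode_right_alt poly = (poly.length : Int) - 1 - (poly.reverse.idxOf (mval poly) : Int) := by
  match poly with
  | v0 :: t =>
    have hmax : PySem.List.max? (v0 :: t) (fun y => y) = some (mval (v0 :: t)) := by
      simpa [mval] using PySem.List.max?_id_cons (x := v0) (t := t)
    have hmem : mval (v0 :: t) ∈ (v0 :: t).reverse :=
      List.mem_reverse.mpr (mval_mem _ (by simp))
    have hidx : PySem.List.index? (v0 :: t).reverse (mval (v0 :: t)) =
        some ((v0 :: t).reverse.idxOf (mval (v0 :: t))) :=
      index?_of_mem _ _ hmem
    simp only [mode_right_alt, hmax, hidx]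

-- ===== VERDICT (by name: the statement is the Claim_ definition above) =====
theorem mode_right_spec : Claim_equal_mode_right := by
  intro poly _ hp
  unfold Spec_mode_right
  rw [mode_right_eq poly hp, mode_right_alt_eq poly hp]
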